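-- pv_equiv track=rewrite | github.com/elenasolovieva943/lab5_6_7 | laba5.py | optimal_schedule
-- ===== SOURCE A (Python) =====
-- from itertools import combinations
--
-- def optimal_schedule(men_list, women_list):
--     best_schedules = []
--     best_score = float('inf')
--
--     for m_count in range(4, 9):
--         for men_group in combinations(men_list, m_count):
--             for women_group in combinations(women_list, 10 - m_count):
--                 team = list(men_group + women_group)
--
--                 for shift1 in combinations(team, 5):
--                     shift2 = tuple(w for w in team if w not in shift1)
--                     if len(shift2) != 5:
--                         continue
--
--                     if all(w.startswith('M') for w in shift1) or all(w.startswith('W') for w in shift1):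
--                         continue
--                     if all(w.startswith('M') for w in shift2) or all(w.startswith('W') for w in shift2):
--                         continue
--
--                     men1 = sum(1 for w in shift1 if w.startswith("M"))
--                     men2 = sum(1 for w in shift2 if w.startswith("M"))
--                     score = abs(men1 - men2)
--
--                     if score < best_score:
--                         best_schedules = [(shift1, shift2)]
--                         best_score = score
--                     elif score == best_score:
--                         best_schedules.append((shift1, shift2))
--
--     return best_schedules
-- ===== SOURCE B (Python) =====
-- from itertools import combinations
--
--
-- def _matches(men_list, women_list, target):
--     # All partitions whose imbalance score equals `target`, in enumeration order.
--     result = []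
--     for m_count in range(4, 9):
--         for men_group in combinations(men_list, m_count):
--             for women_group in combinations(women_list, 10 - m_count):
--                 team = list(men_group + women_group)
--                 for shift1 in combinations(team, 5):
--                     shift2 = tuple(w for w in team if w not in shift1)
--                     if len(shift2) != 5:
--                         continue
--                     if all(w.startswith('M') for w in shift1) or all(w.startswith('W') for w in shift1):
--                         continue
--                     if all(w.startswith('M') for w in shift2) or all(w.startswith('W') for w in shift2):
--                         continue
--                     men1 = sum(1 for w in shift1 if w.startswith("M"))
--                     men2 = sum(1 for w in shift2 if w.startswith("M"))
--                     if abs(men1 - men2) == target: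
--                         result.append((shift1, shift2))
--     return result
--
--
-- def optimal_schedule(men_list, women_list):
--     # Each shift has 5 members and, after the filters, is not all-'M', so it
--     # holds at most 4 'M'-people: every valid score lies in 0..4.  Search the
--     # target score upward and return the first nonempty match list.
--     for target in range(5):
--         matches = _matches(men_list, women_list, target)
--         if matches:
--             return matches
--     return []
-- ===== Notes on version B (the rewrite author's own statement) =====
-- stated objective: alternative
-- what changed: A makes one pass tracking a running (best_schedules, best_score) pair that is reset on improvement; B computes no minimum at all: since every admissible shift of 5 people that is not all-'M' has at most 4 'M'-members, all scores lie in 0..4, so B searches the target score upward (0,1,...,4) and returns the first nonempty list of partitions whose score equals the target.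
import Mathlib
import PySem

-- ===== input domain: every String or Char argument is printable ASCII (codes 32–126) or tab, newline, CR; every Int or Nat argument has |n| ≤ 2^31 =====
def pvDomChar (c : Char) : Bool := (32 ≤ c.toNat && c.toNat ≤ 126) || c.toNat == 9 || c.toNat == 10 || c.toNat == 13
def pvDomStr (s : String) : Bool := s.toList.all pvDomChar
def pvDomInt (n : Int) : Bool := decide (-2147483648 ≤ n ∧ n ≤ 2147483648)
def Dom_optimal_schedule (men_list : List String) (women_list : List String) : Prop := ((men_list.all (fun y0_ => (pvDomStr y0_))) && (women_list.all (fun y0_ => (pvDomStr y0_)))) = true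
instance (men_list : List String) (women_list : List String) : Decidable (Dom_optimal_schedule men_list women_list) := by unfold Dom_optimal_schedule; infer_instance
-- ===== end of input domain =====

-- B replaces A's single pass with a running (best_schedules, best_score) state by an
-- upward search over the bounded score range 0..4, returning the first nonempty match
-- list; no minimum is ever computed (objective: alternative algorithm, same asymptotics).

-- ===== PORT A =====
def pvIsM (w : String) : Bool := PySem.Str.startswith w "M"
def pvIsW (w : String) : Bool := PySem.Str.startswith w "W"

-- A's loop body for one (team, shift1); best_score = float('inf') is modelled as `none`
-- (score is an int, so `score < inf` is always true and `score == inf` never holds).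
def pvStepA (st : List (List String × List String) × Option Int)
    (team : List String) (shift1 : List String) :
    List (List String × List String) × Option Int :=
  let shift2 := team.filter (fun w => !(shift1.contains w))
  if shift2.length ≠ 5 then st
  else if shift1.all pvIsM || shift1.all pvIsW then st
  else if shift2.all pvIsM || shift2.all pvIsW then st
  else
    let men1 : Int := (shift1.filter pvIsM).length
    let men2 : Int := (shift2.filter pvIsM).length
    let score : Int := |men1 - men2|
    match st.2 with
    | none => ([(shift1, shift2)], some score)
    | some b =>
      if score < b then ([(shift1, shift2)], some score)
      else if score = b then (st.1 ++ [(shift1, shift2)], some b)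
      else st

def optimal_schedule (men_list : List String) (women_list : List String) :
    List (List String × List String) :=
  ((PySem.List.pyRange 4 9 1).foldl (fun st m_count =>
    (PySem.List.combinations men_list m_count.toNat).foldl (fun st men_group =>
      (PySem.List.combinations women_list (10 - m_count).toNat).foldl (fun st women_group =>
        let team := men_group ++ women_group
        (PySem.List.combinations team 5).foldl (fun st shift1 =>
          pvStepA st team shift1) st) st) st) ([], none)).1

-- ===== PORT B =====
-- Source B's _matches loop body: append the partition iff its score equals `target`.
def pvStepM (target : Int) (acc : List (List String × List String))
    (team : List String) (shift1 : List String) :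
    List (List String × List String) :=
  let shift2 := team.filter (fun w => !(shift1.contains w))
  if shift2.length ≠ 5 then acc
  else if shift1.all pvIsM || shift1.all pvIsW then acc
  else if shift2.all pvIsM || shift2.all pvIsW then acc
  else
    let men1 : Int := (shift1.filter pvIsM).length
    let men2 : Int := (shift2.filter pvIsM).length
    if |men1 - men2| = target then acc ++ [(shift1, shift2)] else acc

def pvMatches (men_list : List String) (women_list : List String) (target : Int) :
    List (List String × List String) :=
  (PySem.List.pyRange 4 9 1).foldl (fun acc m_count =>
    (PySem.List.combinations men_list m_count.toNat).foldl (fun acc men_group =>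
      (PySem.List.combinations women_list (10 - m_count).toNat).foldl (fun acc women_group =>
        let team := men_group ++ women_group
        (PySem.List.combinations team 5).foldl (fun acc shift1 =>
          pvStepM target acc team shift1) acc) acc) acc) []

-- Source B's main loop: try target = 0,1,2,3,4 and return the first nonempty match list.
def pvSearch (men_list : List String) (women_list : List String) :
    List Int → List (List String × List String)
  | [] => []
  | t :: ts =>
    let ms := pvMatches men_list women_list t
    if ms.isEmpty then pvSearch men_list women_list ts else ms

def optimal_schedule_alt (men_list : List String) (women_list : List String) :
    List (List String × List String) :=
  pvSearch men_list women_list (PySem.List.pyRange 0 5 1)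

-- ===== PRECONDITION & SPEC =====
def Spec_optimal_schedule (men_list : List String) (women_list : List String) (out : List (List String × List String)) : Prop := out = optimal_schedule_alt men_list women_list
instance (men_list : List String) (women_list : List String) (out : List (List String × List String)) : Decidable (Spec_optimal_schedule men_list women_list out) := by unfold Spec_optimal_schedule; infer_instance

-- ===== CLAIM (what is proved, stated in full; the proofs are below) =====
def Claim_equal_optimal_schedule : Prop := ∀ (men_list : List String) (women_list : List String), Dom_optimal_schedule men_list women_list → Spec_optimal_schedule men_list women_list (optimal_schedule men_list women_list)

-- ===== LEMMAS AND PROOFS =====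

-- Proof-only candidate stream: the scored partitions in enumeration order.
def pvStepC (acc : List (Int × (List String × List String)))
    (team : List String) (shift1 : List String) :
    List (Int × (List String × List String)) :=
  let shift2 := team.filter (fun w => !(shift1.contains w))
  if shift2.length ≠ 5 then acc
  else if shift1.all pvIsM || shift1.all pvIsW then acc
  else if shift2.all pvIsM || shift2.all pvIsW then acc
  else
    let men1 : Int := (shift1.filter pvIsM).length
    let men2 : Int := (shift2.filter pvIsM).length
    acc ++ [(|men1 - men2|, (shift1, shift2))]

def pvCandidates (men_list : List String) (women_list : List String) :
    List (Int × (List String × List String)) :=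
  (PySem.List.pyRange 4 9 1).foldl (fun acc m_count =>
    (PySem.List.combinations men_list m_count.toNat).foldl (fun acc men_group =>
      (PySem.List.combinations women_list (10 - m_count).toNat).foldl (fun acc women_group =>
        let team := men_group ++ women_group
        (PySem.List.combinations team 5).foldl (fun acc shift1 =>
          pvStepC acc team shift1) acc) acc) acc) []

-- Simulation relation: A's running state is determined by the candidate list.
def pvR (st : List (List String × List String) × Option Int)
    (cands : List (Int × (List String × List String))) : Prop :=
  match PySem.List.min? (cands.map (fun c => c.1)) (fun x => x) with
  | none => st = ([], none)
  | some b => st = ((cands.filter (fun c => c.1 = b)).map (fun c => c.2), some b)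

theorem pv_min?_nil : PySem.List.min? ([] : List Int) (fun x => x) = none := by
  simp [PySem.List.min?]

theorem pv_min?_id_append_singleton (l : List Int) (s : Int) :
    PySem.List.min? (l ++ [s]) (fun x => x) =
      match PySem.List.min? l (fun x => x) with
      | none => some s
      | some b => some (min b s) := by
  cases l with
  | nil => rw [pv_min?_nil]; simp [PySem.List.min?_id_cons]
  | cons x t =>
    have h1 := PySem.List.min?_id_cons (x := x) (t := t)
    have h2 := PySem.List.min?_id_cons (x := x) (t := t ++ [s])
    simp only [List.cons_append] at *
    rw [h2, h1, List.foldl_append]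
    simp [List.foldl]

theorem pv_step_sim (st : List (List String × List String) × Option Int)
    (cands : List (Int × (List String × List String)))
    (team shift1 : List String) (h : pvR st cands) :
    pvR (pvStepA st team shift1) (pvStepC cands team shift1) := by
  unfold pvStepA pvStepC
  by_cases h1 : (team.filter (fun w => !(shift1.contains w))).length ≠ 5
  · simp only [if_pos h1]; exact h
  · simp only [if_neg h1]
    by_cases h2 : (shift1.all pvIsM || shift1.all pvIsW) = true
    · simp only [if_pos h2]; exact h
    · simp only [if_neg h2]
      by_cases h3 : ((team.filter (fun w => !(shift1.contains w))).all pvIsM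
          || (team.filter (fun w => !(shift1.contains w))).all pvIsW) = true
      · simp only [if_pos h3]; exact h
      · simp only [if_neg h3]
        set s2 := team.filter (fun w => !(shift1.contains w)) with hs2
        set score : Int :=
          |((shift1.filter pvIsM).length : Int) - ((s2.filter pvIsM).length : Int)| with hscore
        unfold pvR at h ⊢
        simp only [List.map_append, List.map_cons, List.map_nil]
        rw [pv_min?_id_append_singleton]
        cases hmin : PySem.List.min? (cands.map (fun c => c.1)) (fun x => x) with
        | none =>
          rw [hmin] at h
          have h' : st = ([], none) := h
          subst h'
          have hc : cands = [] := List.map_eq_nil_iff.mp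
            ((PySem.List.min?_eq_none_iff (xs := cands.map (fun c => c.1)) (key := fun x => x)).mp hmin)
          subst hc
          simp
        | some b =>
          rw [hmin] at h
          have h' : st = ((cands.filter (fun c => decide (c.1 = b))).map (fun c => c.2), some b) := h
          subst h'
          have hble : ∀ y ∈ cands.map (fun c => c.1), b ≤ y :=
            fun y hy => PySem.List.min?_isMin (key := fun x => x) hmin y hy
          by_cases hlt : score < b
          · have hfe : cands.filter (fun c : Int × (List String × List String) => decide (c.1 = score)) = [] := by
              rw [List.filter_eq_nil_iff]
              intro c hc
              have := hble c.1 (List.mem_map.mpr ⟨c, hc, rfl⟩)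
              simp only [decide_eq_true_eq]
              omega
            have hmineq : min b score = score := by omega
            simp [List.filter_append, hlt, hfe, hmineq]
          · by_cases heq : score = b
            · simp [List.filter_append, heq]
            · have hmineq : min b score = b := by omega
              simp [List.filter_append, hlt, heq, hmineq]

theorem pv_foldl_sim {σ τ ι : Type} (R : σ → τ → Prop) (f : σ → ι → σ) (g : τ → ι → τ)
    (h : ∀ s t i, R s t → R (f s i) (g t i)) :
    ∀ (l : List ι) (s : σ) (t : τ), R s t → R (l.foldl f s) (l.foldl g t) := by
  intro l
  induction l with
  | nil => intro s t hst; exact hst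
  | cons x xs ih => intro s t hst; exact ih _ _ (h _ _ _ hst)

theorem pv_main_sim (men_list women_list : List String) :
    pvR (((PySem.List.pyRange 4 9 1).foldl (fun st m_count =>
        (PySem.List.combinations men_list m_count.toNat).foldl (fun st men_group =>
          (PySem.List.combinations women_list (10 - m_count).toNat).foldl (fun st women_group =>
            let team := men_group ++ women_group
            (PySem.List.combinations team 5).foldl (fun st shift1 =>
              pvStepA st team shift1) st) st) st) ([], none)))
      (pvCandidates men_list women_list) := by
  unfold pvCandidates
  refine pv_foldl_sim pvR _ _ ?_ _ _ _ ?_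
  · intro s t m hst
    refine pv_foldl_sim pvR _ _ ?_ _ _ _ hst
    intro s t mg hst
    refine pv_foldl_sim pvR _ _ ?_ _ _ _ hst
    intro s t wg hst
    refine pv_foldl_sim pvR _ _ ?_ _ _ _ hst
    intro s t s1 hst
    exact pv_step_sim _ _ _ _ hst
  · unfold pvR
    rw [List.map_nil, pv_min?_nil]

-- B-side: matches at target t = filter of the candidate stream by score t.
def pvRM (t : Int) (acc : List (List String × List String))
    (cands : List (Int × (List String × List String))) : Prop :=
  acc = (cands.filter (fun c => c.1 = t)).map (fun c => c.2)

theorem pv_stepM_sim (t : Int) (acc : List (List String × List String))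
    (cands : List (Int × (List String × List String)))
    (team shift1 : List String)
    (h : pvRM t acc cands) :
    pvRM t (pvStepM t acc team shift1) (pvStepC cands team shift1) := by
  unfold pvRM at h ⊢
  unfold pvStepM pvStepC
  by_cases h1 : (team.filter (fun w => !(shift1.contains w))).length ≠ 5
  · simp only [if_pos h1]; exact h
  · simp only [if_neg h1]
    by_cases h2 : (shift1.all pvIsM || shift1.all pvIsW) = true
    · simp only [if_pos h2]; exact h
    · simp only [if_neg h2]
      by_cases h3 : ((team.filter (fun w => !(shift1.contains w))).all pvIsM
          || (team.filter (fun w => !(shift1.contains w))).all pvIsW) = true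
      · simp only [if_pos h3]; exact h
      · simp only [if_neg h3]
        set s2 := team.filter (fun w => !(shift1.contains w)) with hs2
        set score : Int :=
          |((shift1.filter pvIsM).length : Int) - ((s2.filter pvIsM).length : Int)| with hscore
        by_cases he : score = t
        · simp [List.filter_append, he, h]
        · simp [List.filter_append, he, h]

theorem pv_matches_eq (men_list women_list : List String) (t : Int) :
    pvMatches men_list women_list t =
      ((pvCandidates men_list women_list).filter (fun c => c.1 = t)).map (fun c => c.2) := by
  unfold pvMatches pvCandidates
  refine pv_foldl_sim (pvRM t) _ _ ?_ _ _ _ (by simp [pvRM])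
  intro s c m hst
  refine pv_foldl_sim (pvRM t) _ _ ?_ _ _ _ hst
  intro s c mg hst
  refine pv_foldl_sim (pvRM t) _ _ ?_ _ _ _ hst
  intro s c wg hst
  refine pv_foldl_sim (pvRM t) _ _ ?_ _ _ _ hst
  intro s c s1 hst
  exact pv_stepM_sim _ _ _ _ _ hst

-- Every candidate score lies in 0..4 (each shift has 5 members, not all 'M').
def pvBnd (cands : List (Int × (List String × List String))) : Prop :=
  ∀ c ∈ cands, 0 ≤ c.1 ∧ c.1 ≤ 4

theorem pv_foldl_inv {σ ι : Type} (P : σ → Prop) (f : σ → ι → σ)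
    (l : List ι) (h : ∀ s i, i ∈ l → P s → P (f s i)) :
    ∀ s, P s → P (l.foldl f s) := by
  induction l with
  | nil => intro s hs; exact hs
  | cons x xs ih =>
    intro s hs
    exact ih (fun s i hi => h s i (List.mem_cons_of_mem _ hi)) _
      (h s x (List.mem_cons_self) hs)

theorem pv_stepC_bnd (acc : List (Int × (List String × List String)))
    (team shift1 : List String) (hlen : shift1.length = 5)
    (h : pvBnd acc) : pvBnd (pvStepC acc team shift1) := by
  unfold pvStepC
  by_cases h1 : (team.filter (fun w => !(shift1.contains w))).length ≠ 5
  · simp only [if_pos h1]; exact h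
  · simp only [if_neg h1]
    by_cases h2 : (shift1.all pvIsM || shift1.all pvIsW) = true
    · simp only [if_pos h2]; exact h
    · simp only [if_neg h2]
      by_cases h3 : ((team.filter (fun w => !(shift1.contains w))).all pvIsM
          || (team.filter (fun w => !(shift1.contains w))).all pvIsW) = true
      · simp only [if_pos h3]; exact h
      · simp only [if_neg h3]
        intro c hc
        rcases List.mem_append.mp hc with hc | hc
        · exact h c hc
        · have hc' : c = (|((shift1.filter pvIsM).length : Int) -
              (((team.filter (fun w => !(shift1.contains w))).filter pvIsM).length : Int)|,
              (shift1, team.filter (fun w => !(shift1.contains w)))) := by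
            simpa using hc
          subst hc'
          rw [Bool.or_eq_true, not_or] at h2 h3
          have hm1 : (shift1.filter pvIsM).length < shift1.length := by
            have h2' : ¬ ∀ x ∈ shift1, pvIsM x = true := by
              rw [← List.all_eq_true]; exact h2.1
            push Not at h2'
            rcases h2' with ⟨x, hx, hpx⟩
            exact List.length_filter_lt_length_iff_exists.mpr ⟨x, hx, by simpa using hpx⟩
          have hm2 : ((team.filter (fun w => !(shift1.contains w))).filter pvIsM).length <
              (team.filter (fun w => !(shift1.contains w))).length := by
            have h3' : ¬ ∀ x ∈ team.filter (fun w => !(shift1.contains w)), pvIsM x = true := by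
              rw [← List.all_eq_true]; exact h3.1
            push Not at h3'
            rcases h3' with ⟨x, hx, hpx⟩
            exact List.length_filter_lt_length_iff_exists.mpr ⟨x, hx, by simpa using hpx⟩
          have hl2 : (team.filter (fun w => !(shift1.contains w))).length = 5 := by omega
          rw [hlen] at hm1
          rw [hl2] at hm2
          constructor
          · exact abs_nonneg _
          · rcases abs_cases (((shift1.filter pvIsM).length : Int) -
              (((team.filter (fun w => !(shift1.contains w))).filter pvIsM).length : Int)) with
              ⟨he, _⟩ | ⟨he, _⟩ <;> rw [he] <;> omega

theorem pv_cands_bnd (men_list women_list : List String) :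
    pvBnd (pvCandidates men_list women_list) := by
  unfold pvCandidates
  refine pv_foldl_inv pvBnd _ _ ?_ _ (by intro c hc; cases hc)
  intro s m _ hs
  refine pv_foldl_inv pvBnd _ _ ?_ _ hs
  intro s mg _ hs
  refine pv_foldl_inv pvBnd _ _ ?_ _ hs
  intro s wg _ hs
  refine pv_foldl_inv pvBnd _ _ ?_ _ hs
  intro s s1 hs1 hs
  exact pv_stepC_bnd _ _ _
    (PySem.List.length_of_mem_combinations hs1) hs

-- For t strictly below the minimum, the match list is empty.
theorem pv_matches_empty_of_lt (men_list women_list : List String) (b t : Int)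
    (hmin : PySem.List.min? ((pvCandidates men_list women_list).map (fun c => c.1))
      (fun x => x) = some b) (hlt : t < b) :
    pvMatches men_list women_list t = [] := by
  rw [pv_matches_eq]
  have hble := PySem.List.min?_isMin (key := fun x => x) hmin
  have : (pvCandidates men_list women_list).filter
      (fun c : Int × (List String × List String) => decide (c.1 = t)) = [] := by
    rw [List.filter_eq_nil_iff]
    intro c hc
    have hb' : b ≤ c.1 := by simpa using hble c.1 (List.mem_map.mpr ⟨c, hc, rfl⟩)
    simp only [decide_eq_true_eq]
    omega
  rw [this, List.map_nil]

theorem pv_matches_ne_nil (men_list women_list : List String) (b : Int)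
    (hmin : PySem.List.min? ((pvCandidates men_list women_list).map (fun c => c.1))
      (fun x => x) = some b) :
    pvMatches men_list women_list b ≠ [] := by
  rw [pv_matches_eq]
  have hb := PySem.List.min?_mem (key := fun x => x) hmin
  rcases List.mem_map.mp hb with ⟨c, hc, hcb⟩
  intro hcontra
  have := List.map_eq_nil_iff.mp hcontra
  rw [List.filter_eq_nil_iff] at this
  exact this c hc (by simpa using hcb)

-- ===== VERDICT (by name: the statement is the Claim_ definition above) =====
theorem optimal_schedule_spec : Claim_equal_optimal_schedule := by
  intro men_list women_list _
  unfold Spec_optimal_schedule optimal_schedule optimal_schedule_alt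
  have h := pv_main_sim men_list women_list
  unfold pvR at h
  have hrange : PySem.List.pyRange 0 5 1 = [0, 1, 2, 3, 4] := by decide
  rw [hrange]
  cases hmin : PySem.List.min? ((pvCandidates men_list women_list).map (fun c => c.1)) (fun x => x) with
  | none =>
    rw [hmin] at h
    have hnil : pvCandidates men_list women_list = [] := by
      have := (PySem.List.min?_eq_none_iff
        (xs := (pvCandidates men_list women_list).map (fun c => c.1)) (key := fun x => x)).mp hmin
      exact List.map_eq_nil_iff.mp this
    have hm : ∀ t : Int, pvMatches men_list women_list t = [] := by
      intro t; rw [pv_matches_eq, hnil]; rfl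
    rw [h]
    simp [pvSearch, hm]
  | some b =>
    rw [hmin] at h
    have hb := PySem.List.min?_mem (key := fun x => x) hmin
    rcases List.mem_map.mp hb with ⟨c, hc, hcb⟩
    have hbnd := pv_cands_bnd men_list women_list c hc
    have hb0 : 0 ≤ b := by rw [← hcb]; exact hbnd.1
    have hb4 : b ≤ 4 := by rw [← hcb]; exact hbnd.2
    have hne := pv_matches_ne_nil men_list women_list b hmin
    have hres : pvMatches men_list women_list b =
        ((pvCandidates men_list women_list).filter (fun c => c.1 = b)).map (fun c => c.2) :=
      pv_matches_eq men_list women_list b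
    have hemp : ∀ t : Int, t < b → pvMatches men_list women_list t = [] :=
      fun t ht => pv_matches_empty_of_lt men_list women_list b t hmin ht
    rw [h]
    interval_cases b
    · simp_all [pvSearch, List.isEmpty_iff]
    · have e0 := hemp 0 (by norm_num)
      simp_all [pvSearch, List.isEmpty_iff]
    · have e0 := hemp 0 (by norm_num); have e1 := hemp 1 (by norm_num)
      simp_all [pvSearch, List.isEmpty_iff]
    · have e0 := hemp 0 (by norm_num); have e1 := hemp 1 (by norm_num)
      have e2 := hemp 2 (by norm_num)
      simp_all [pvSearch, List.isEmpty_iff]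
    · have e0 := hemp 0 (by norm_num); have e1 := hemp 1 (by norm_num)
      have e2 := hemp 2 (by norm_num); have e3 := hemp 3 (by norm_num)
      simp_all [pvSearch, List.isEmpty_iff]
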